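-- pv_equiv track=rewrite | github.com/robbobbinett/learning_atlas_Graphs | 20_nov_2023.py | boundary_collapse
-- ===== SOURCE A (Python) =====
-- def boundary_collapse(bound_dict):
--     bound_set = set()
--     for key, feats in bound_dict.items():
--         for feat in feats:
--             feat.sort()
--             toople = tuple(feat)
--             if toople in bound_set:
--                 bound_set.remove(toople)
--             else:
--                 bound_set.add(toople)
--     return bound_set
-- ===== SOURCE B (Python) =====
-- def boundary_collapse(bound_dict):
--     counts = {}
--     for key, feats in bound_dict.items():
--         for feat in feats:
--             feat.sort()
--             t = tuple(feat)
--             counts[t] = counts.pop(t, 0) + 1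
--     return {t for t, c in counts.items() if c % 2}
-- ===== Notes on version B (the rewrite author's own statement) =====
-- stated objective: alternative
-- what changed: A incrementally toggles each sorted tuple in and out of a set; B makes one counting pass into a dict of multiplicities and then filters the final counts by odd parity.
import Mathlib
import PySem

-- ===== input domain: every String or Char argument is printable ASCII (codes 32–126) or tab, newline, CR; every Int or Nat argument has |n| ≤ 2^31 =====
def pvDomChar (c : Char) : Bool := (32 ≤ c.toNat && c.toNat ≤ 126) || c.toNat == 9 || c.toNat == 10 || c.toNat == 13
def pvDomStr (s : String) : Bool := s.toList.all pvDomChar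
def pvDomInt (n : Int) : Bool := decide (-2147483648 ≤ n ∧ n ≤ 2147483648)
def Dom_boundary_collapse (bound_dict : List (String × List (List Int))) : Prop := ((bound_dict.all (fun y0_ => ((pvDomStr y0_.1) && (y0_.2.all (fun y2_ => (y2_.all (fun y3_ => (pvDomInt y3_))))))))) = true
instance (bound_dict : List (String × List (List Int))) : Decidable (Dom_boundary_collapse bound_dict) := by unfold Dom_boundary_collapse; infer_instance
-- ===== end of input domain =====

-- B replaces A's incremental membership toggle by a count-into-a-dict pass plus a parity
-- filter over the final counts (objective: alternative algorithm, same cost). Both versions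
-- sort each inner list in place (feat.sort()); the equivalence proved is about the return value.

-- ===== PORT A =====
def boundary_collapse (bound_dict : List (String × List (List Int))) : List (List Int) :=
  bound_dict.foldl
    (fun bound_set kv =>
      kv.2.foldl
        (fun bound_set feat =>
          let toople := PySem.List.sorted feat (fun x => x) false  -- feat.sort(); toople = tuple(feat)
          if PySem.Set.contains bound_set toople then
            (PySem.Set.remove? bound_set toople).getD bound_set    -- bound_set.remove(toople); guarded, so never KeyError
          else
            PySem.Set.add bound_set toople)
        bound_set)
    PySem.Set.empty

-- ===== PORT B =====
def boundary_collapse_alt (bound_dict : List (String × List (List Int))) : List (List Int) :=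
  let counts : PySem.Dict (List Int) Int :=
    bound_dict.foldl
      (fun counts kv =>
        kv.2.foldl
          (fun counts feat =>
            let t := PySem.List.sorted feat (fun x => x) false     -- feat.sort(); t = tuple(feat)
            -- counts[t] = counts.pop(t, 0) + 1  (pop with default: value-or-0, key removed, then re-insert)
            (PySem.Dict.erase counts t).insert t (PySem.Dict.getD counts t 0 + 1))
          counts)
      PySem.Dict.empty
  -- {t for t, c in counts.items() if c % 2}
  PySem.Set.ofList
    (((PySem.Dict.items counts).filter (fun p => decide (PySem.Int.mod p.2 2 ≠ 0))).map Prod.fst)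

-- ===== PRECONDITION & SPEC =====
def Spec_boundary_collapse (bound_dict : List (String × List (List Int))) (out : List (List Int)) : Prop := out = boundary_collapse_alt bound_dict
instance (bound_dict : List (String × List (List Int))) (out : List (List Int)) : Decidable (Spec_boundary_collapse bound_dict out) := by unfold Spec_boundary_collapse; infer_instance

-- ===== CLAIM (what is proved, stated in full; the proofs are below) =====
def Claim_equal_boundary_collapse : Prop := ∀ (bound_dict : List (String × List (List Int))), Dom_boundary_collapse bound_dict → Spec_boundary_collapse bound_dict (boundary_collapse bound_dict)

-- ===== LEMMAS AND PROOFS =====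

def pvStepA (s : List (List Int)) (t : List Int) : List (List Int) :=
  if PySem.Set.contains s t then (PySem.Set.remove? s t).getD s else PySem.Set.add s t

def pvStepB (d : PySem.Dict (List Int) Int) (t : List Int) : PySem.Dict (List Int) Int :=
  (PySem.Dict.erase d t).insert t (PySem.Dict.getD d t 0 + 1)

def pvOdd (l : List (List Int × Int)) : List (List Int) :=
  (l.filter (fun p => decide (PySem.Int.mod p.2 2 ≠ 0))).map Prod.fst

def pvOddK (d : PySem.Dict (List Int) Int) : List (List Int) := pvOdd d.items

lemma pvMod (a : Int) : PySem.Int.mod a 2 = a % 2 := by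
  simp [PySem.Int.mod, Int.fmod_eq_emod]

lemma pvOdd_cons_odd {k : List Int} {v : Int} {l : List (List Int × Int)}
    (h : v % 2 = 1) : pvOdd ((k, v) :: l) = k :: pvOdd l := by
  simp [pvOdd, List.filter_cons, pvMod, h]

lemma pvOdd_cons_even {k : List Int} {v : Int} {l : List (List Int × Int)}
    (h : v % 2 = 0) : pvOdd ((k, v) :: l) = pvOdd l := by
  simp [pvOdd, List.filter_cons, pvMod, h]

lemma pvOdd_append (l m : List (List Int × Int)) :
    pvOdd (l ++ m) = pvOdd l ++ pvOdd m := by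
  simp [pvOdd, List.filter_append]

lemma pvOdd_nil : pvOdd [] = [] := rfl

lemma pvMem_pvOdd {l : List (List Int × Int)} {x : List Int} (h : x ∈ pvOdd l) :
    x ∈ l.map Prod.fst := by
  simp only [pvOdd, List.mem_map, List.mem_filter] at h ⊢
  obtain ⟨p, ⟨hp, _⟩, rfl⟩ := h
  exact ⟨p, hp, rfl⟩

lemma pvStepA_cons {k t : List Int} (s : List (List Int)) (hk : k ≠ t) :
    pvStepA (k :: s) t = k :: pvStepA s t := by
  have hk' : ¬t = k := fun h => hk h.symm
  by_cases hc : t ∈ s <;>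
    simp [pvStepA, PySem.Set.contains, PySem.Set.remove?, PySem.Set.discard,
      PySem.Set.add, hc, hk, hk', List.filter_cons]

lemma pvStep_items (l : List (List Int × Int)) (t : List Int)
    (h : (l.map Prod.fst).Nodup) :
    pvOdd (l.filter (fun p => !(p.1 == t)) ++
        [(t, ((l.find? (fun p => p.1 == t)).map Prod.snd).getD 0 + 1)]) =
      pvStepA (pvOdd l) t := by
  induction l with
  | nil =>
    simp [pvOdd, pvStepA, PySem.Set.contains, PySem.Set.add, pvMod]
  | cons p l ih =>
    obtain ⟨k, v⟩ := p
    simp only [List.map_cons, List.nodup_cons] at h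
    obtain ⟨hknot, hnd⟩ := h
    by_cases hk : k = t
    · subst hk
      have hfilter : l.filter (fun p => !(p.1 == k)) = l := by
        apply List.filter_eq_self.mpr
        intro p hp
        simp only [Bool.not_eq_eq_eq_not, Bool.not_true, beq_eq_false_iff_ne, ne_eq]
        exact fun hpk => hknot (hpk ▸ List.mem_map_of_mem hp)
      have hnotodd : k ∉ pvOdd l := fun hmem => hknot (pvMem_pvOdd hmem)
      have hstep : ((k, v) :: l).filter (fun p => !(p.1 == k)) = l := by
        rw [List.filter_cons]; simp [hfilter]
      have hfind : ((k, v) :: l).find? (fun p => p.1 == k) = some (k, v) :=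
        List.find?_cons_of_pos (by simp)
      rw [hstep, hfind]
      simp only [Option.map_some, Option.getD_some]
      have hfil : (pvOdd l).filter (fun y => !(y == k)) = pvOdd l := by
        apply List.filter_eq_self.mpr
        intro a ha
        simp only [Bool.not_eq_eq_eq_not, Bool.not_true, beq_eq_false_iff_ne, ne_eq]
        exact fun hak => hnotodd (hak ▸ ha)
      have hconL : (pvOdd l).contains k = false := by
        simp [List.contains_eq_mem, hnotodd]
      rcases Int.emod_two_eq v with hv | hv
      · -- v even : k absent from the toggle set, gets added; v+1 odd
        rw [pvOdd_cons_even hv, pvOdd_append, pvOdd_cons_odd (by omega), pvOdd_nil]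
        rw [pvStepA, if_neg (by simp [PySem.Set.contains, List.contains_eq_mem, hnotodd]), PySem.Set.add, if_neg (by simp [PySem.Set.contains, List.contains_eq_mem, hnotodd])]
      · -- v odd : k present in the toggle set, gets removed; v+1 even
        rw [pvOdd_cons_odd hv, pvOdd_append, pvOdd_cons_even (by omega), pvOdd_nil,
          List.append_nil]
        have hcon : PySem.Set.contains (k :: pvOdd l) k = true := by
          simp [PySem.Set.contains, List.contains_eq_mem]
        rw [pvStepA, if_pos hcon, PySem.Set.remove?, if_pos hcon]
        simp [PySem.Set.discard, List.filter_cons, hfil]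
    · have hbeq : (k == t) = false := by simp [hk]
      simp only [List.filter_cons, hbeq, Bool.not_false, List.find?_cons, cond_false,
        if_true, List.cons_append]
      rcases Int.emod_two_eq v with hv | hv
      · rw [pvOdd_cons_even hv, pvOdd_cons_even hv]
        exact ih hnd
      · rw [pvOdd_cons_odd hv, pvOdd_cons_odd hv, pvStepA_cons _ hk]
        exact congrArg _ (ih hnd)

lemma pvStepB_items (d : PySem.Dict (List Int) Int) (t : List Int) :
    (pvStepB d t).items = d.items.filter (fun p => !(p.1 == t)) ++
      [(t, ((d.items.find? (fun p => p.1 == t)).map Prod.snd).getD 0 + 1)] := by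
  have hcon : (PySem.Dict.erase d t).contains t = false := by
    simp [PySem.Dict.erase, PySem.Dict.contains, List.any_filter]
  simp only [pvStepB, PySem.Dict.insert, hcon, Bool.false_eq_true, if_false]
  simp [PySem.Dict.erase, PySem.Dict.getD, PySem.Dict.get?]

lemma pvStepB_nodup (d : PySem.Dict (List Int) Int) (t : List Int)
    (h : d.keys.Nodup) : (pvStepB d t).keys.Nodup := by
  have hsub : ((d.items.filter (fun p => !(p.1 == t))).map Prod.fst).Sublist
      (d.items.map Prod.fst) := List.filter_sublist.map _
  have hnd : ((d.items.filter (fun p => !(p.1 == t))).map Prod.fst).Nodup :=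
    hsub.nodup h
  simp only [PySem.Dict.keys, pvStepB_items, List.map_append, List.map_cons, List.map_nil]
  rw [List.nodup_append]
  refine ⟨hnd, List.nodup_singleton _, ?_⟩
  intro a ha
  simp only [List.mem_map, List.mem_filter] at ha
  obtain ⟨p, ⟨_, hp⟩, rfl⟩ := ha
  simp only [Bool.not_eq_eq_eq_not, Bool.not_true, beq_eq_false_iff_ne, ne_eq] at hp
  simp [hp]

lemma pvStepB_oddK (d : PySem.Dict (List Int) Int) (t : List Int)
    (h : d.keys.Nodup) : pvOddK (pvStepB d t) = pvStepA (pvOddK d) t := by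
  rw [pvOddK, pvStepB_items, pvStep_items _ _ h]
  rfl

lemma pvFoldB {α : Type} (xs : List α) (k : α → List Int)
    (d : PySem.Dict (List Int) Int) (h : d.keys.Nodup) :
    (xs.foldl (fun d x => pvStepB d (k x)) d).keys.Nodup ∧
      pvOddK (xs.foldl (fun d x => pvStepB d (k x)) d) =
        xs.foldl (fun s x => pvStepA s (k x)) (pvOddK d) := by
  induction xs generalizing d with
  | nil => exact ⟨h, rfl⟩
  | cons x xs ih =>
    simp only [List.foldl_cons]
    obtain ⟨h1, h2⟩ := ih (pvStepB d (k x)) (pvStepB_nodup _ _ h)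
    exact ⟨h1, by rw [h2, pvStepB_oddK _ _ h]⟩

lemma pvFoldB2 (bd : List (String × List (List Int)))
    (d : PySem.Dict (List Int) Int) (h : d.keys.Nodup) :
    (bd.foldl (fun d kv => kv.2.foldl
        (fun d feat => pvStepB d (PySem.List.sorted feat (fun x => x) false)) d) d).keys.Nodup ∧
      pvOddK (bd.foldl (fun d kv => kv.2.foldl
        (fun d feat => pvStepB d (PySem.List.sorted feat (fun x => x) false)) d) d) =
        bd.foldl (fun s kv => kv.2.foldl
        (fun s feat => pvStepA s (PySem.List.sorted feat (fun x => x) false)) s) (pvOddK d) := by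
  induction bd generalizing d with
  | nil => exact ⟨h, rfl⟩
  | cons kv bd ih =>
    simp only [List.foldl_cons]
    obtain ⟨h1, h2⟩ := pvFoldB kv.2 (fun feat => PySem.List.sorted feat (fun x => x) false) d h
    obtain ⟨h3, h4⟩ := ih _ h1
    exact ⟨h3, by rw [h4, h2]⟩

lemma pvOdd_nodup {l : List (List Int × Int)} (h : (l.map Prod.fst).Nodup) :
    (pvOdd l).Nodup := by
  have hsub : (pvOdd l).Sublist (l.map Prod.fst) := by
    unfold pvOdd
    exact List.filter_sublist.map _
  exact hsub.nodup h

lemma pvOddK_nodup (d : PySem.Dict (List Int) Int) (h : d.keys.Nodup) :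
    (pvOddK d).Nodup := pvOdd_nodup h

-- ===== VERDICT (by name: the statement is the Claim_ definition above) =====
theorem boundary_collapse_spec : Claim_equal_boundary_collapse := by
  intro bd _
  show boundary_collapse bd = boundary_collapse_alt bd

  have hA : boundary_collapse bd =
      bd.foldl (fun s kv => kv.2.foldl
        (fun s feat => pvStepA s (PySem.List.sorted feat (fun x => x) false)) s) [] := rfl
  have hB : boundary_collapse_alt bd =
      PySem.Set.ofList (pvOddK (bd.foldl (fun d kv => kv.2.foldl
        (fun d feat => pvStepB d (PySem.List.sorted feat (fun x => x) false)) d)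
        PySem.Dict.empty)) := rfl
  obtain ⟨hnd, heq⟩ := pvFoldB2 bd PySem.Dict.empty PySem.Dict.nodup_keys_empty
  rw [hA, hB]
  rw [show PySem.Set.ofList (pvOddK (bd.foldl (fun d kv => kv.2.foldl
        (fun d feat => pvStepB d (PySem.List.sorted feat (fun x => x) false)) d)
        PySem.Dict.empty)) = pvOddK (bd.foldl (fun d kv => kv.2.foldl
        (fun d feat => pvStepB d (PySem.List.sorted feat (fun x => x) false)) d)
        PySem.Dict.empty) from PySem.Set.ofList_eq_self_of_nodup _ (pvOddK_nodup _ hnd)]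
  rw [heq]
  rfl
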